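-- pv_equiv track=rewrite | github.com/marceaupatu123/Generateur-de-M-et-P-pour-la-Methode-Somme-Produit | MPS.py | genp
-- ===== SOURCE A (Python) =====
-- def genp(ac, factors):
--     tableauDeToutesLesPossibilités = []
--     tableau1 = factors.copy()
--     tableau2 = []
--     for i in range(0,len(factors)-1):
--         tableau2.append(tableau1[0])
--         tableau1.pop(0)
--         n1 = 1
--         n2 = 1
--         for i in range(0,len(tableau1)):
--             n1 = tableau1[i] * n1
--         for i in range(0,len(tableau2)):
--             n2 = tableau2[i] * n2
--         tableauDeToutesLesPossibilités.append([n1, n2])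
--     return tableauDeToutesLesPossibilités
-- ===== SOURCE B (Python) =====
-- def genp(ac, factors):
--     n = len(factors)
--     # suffix products: suf[i] = product of factors[i:]
--     suf = [1] * (n + 1)
--     for i in range(n - 1, -1, -1):
--         suf[i] = factors[i] * suf[i + 1]
--     res = []
--     p = 1
--     for i in range(n - 1):
--         p = factors[i] * p
--         res.append([suf[i + 1], p])
--     return res
-- ===== Notes on version B (the rewrite author's own statement) =====
-- stated objective: faster
-- what changed: Replaces the quadratic loop that re-multiplies both partitions from scratch at every split with a precomputed suffix-product array and a running prefix product, one pass each.
import Mathlib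
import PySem

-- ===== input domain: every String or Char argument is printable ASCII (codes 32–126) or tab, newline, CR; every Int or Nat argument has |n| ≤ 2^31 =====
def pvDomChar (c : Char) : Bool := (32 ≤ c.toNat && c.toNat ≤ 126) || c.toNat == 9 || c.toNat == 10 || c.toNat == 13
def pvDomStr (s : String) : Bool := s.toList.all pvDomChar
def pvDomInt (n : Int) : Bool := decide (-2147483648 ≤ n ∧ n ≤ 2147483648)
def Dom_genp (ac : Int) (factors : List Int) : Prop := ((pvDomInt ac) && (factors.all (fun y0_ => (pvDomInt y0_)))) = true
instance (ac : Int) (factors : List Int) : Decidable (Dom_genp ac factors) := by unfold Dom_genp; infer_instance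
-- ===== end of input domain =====

-- B replaces A's quadratic re-multiplication of both partitions at every split by a
-- precomputed suffix-product list and a running prefix product (objective: faster, O(n)).

-- ===== PORT A =====
-- literal transliteration of A: the outer loop moves the head of tableau1 onto tableau2,
-- then two inner index loops re-multiply each partition from scratch.
def genp (ac : Int) (factors : List Int) : List (List Int) :=
  ((PySem.List.pyRange 0 ((factors.length : Int) - 1) 1).foldl
    (fun (st : List (List Int) × List Int × List Int) _ =>
      let t2 := st.2.2 ++ [PySem.List.pyGetD st.2.1 0 0]   -- tableau2.append(tableau1[0])
      let t1 := st.2.1.tail                                 -- tableau1.pop(0)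
      let n1 := (PySem.List.pyRange 0 (t1.length : Int) 1).foldl
        (fun n1 i => PySem.List.pyGetD t1 i 0 * n1) 1
      let n2 := (PySem.List.pyRange 0 (t2.length : Int) 1).foldl
        (fun n2 i => PySem.List.pyGetD t2 i 0 * n2) 1
      (st.1 ++ [[n1, n2]], t1, t2))
    ([], factors, [])).1

-- ===== PORT B =====
-- suffix products: sufProds l has length l.length+1, entry i = product of l.drop i
def sufProds : List Int → List Int
  | [] => [1]
  | x :: xs =>
    let s := sufProds xs
    (x * s.headD 1) :: s

-- walk factors and the suffix-product list in step, carrying the running prefix product p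
def genpAltLoop : Int → List Int → List Int → List (List Int)
  | p, x :: xs, _ :: ss =>
      if xs.isEmpty then [] else [ss.headD 1, x * p] :: genpAltLoop (x * p) xs ss
  | _, _, _ => []

def genp_alt (ac : Int) (factors : List Int) : List (List Int) :=
  genpAltLoop 1 factors (sufProds factors)

-- ===== PRECONDITION & SPEC =====
def Spec_genp (ac : Int) (factors : List Int) (out : List (List Int)) : Prop := out = genp_alt ac factors
instance (ac : Int) (factors : List Int) (out : List (List Int)) : Decidable (Spec_genp ac factors out) := by unfold Spec_genp; infer_instance

-- ===== CLAIM (what is proved, stated in full; the proofs are below) =====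
def Claim_equal_genp : Prop := ∀ (ac : Int) (factors : List Int), Dom_genp ac factors → Spec_genp ac factors (genp ac factors)

-- ===== LEMMAS AND PROOFS =====

-- A's outer-loop body as a named step function (proof-side only)
def stepA (st : List (List Int) × List Int × List Int) : List (List Int) × List Int × List Int :=
  let t2 := st.2.2 ++ [PySem.List.pyGetD st.2.1 0 0]
  let t1 := st.2.1.tail
  let n1 := (PySem.List.pyRange 0 (t1.length : Int) 1).foldl
    (fun n1 i => PySem.List.pyGetD t1 i 0 * n1) 1
  let n2 := (PySem.List.pyRange 0 (t2.length : Int) 1).foldl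
    (fun n2 i => PySem.List.pyGetD t2 i 0 * n2) 1
  (st.1 ++ [[n1, n2]], t1, t2)

theorem foldl_const_iterate {α β : Type} (l : List α) (f : β → β) (init : β) :
    l.foldl (fun st _ => f st) init = f^[l.length] init := by
  induction l generalizing init with
  | nil => rfl
  | cons x xs ih => simp [List.foldl_cons, ih, Function.iterate_succ_apply]

theorem foldl_mul_rev (l : List Int) (c : Int) :
    l.foldl (fun a x => x * a) c = l.prod * c := by
  induction l generalizing c with
  | nil => simp
  | cons x xs ih => simp [List.foldl_cons, ih]; ring

theorem sufProds_headD (l : List Int) : (sufProds l).headD 1 = l.prod := by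
  induction l with
  | nil => rfl
  | cons x xs ih => simp only [sufProds, List.headD_cons, ih, List.prod_cons]

theorem stepA_cons (acc : List (List Int)) (a : Int) (rest t2 : List Int) :
    stepA (acc, a :: rest, t2) = (acc ++ [[rest.prod, (t2 ++ [a]).prod]], rest, t2 ++ [a]) := by
  simp only [stepA, PySem.List.pyGetD_zero_cons, List.tail_cons,
             PySem.List.foldl_pyRange_zero_pyGetD' (f := fun (a x : Int) => x * a),
             foldl_mul_rev, mul_one]

-- characterization of A's iterated step
theorem stepA_iterate (l : List Int) :
    ∀ (k m : Nat) (acc : List (List Int)), m + k ≤ l.length →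
    (stepA^[k] (acc, l.drop m, l.take m)).1 =
      acc ++ (List.range k).map (fun j => [(l.drop (m + j + 1)).prod, (l.take (m + j + 1)).prod]) := by
  intro k
  induction k with
  | zero => intro m acc _; simp
  | succ k ih =>
    intro m acc hm
    have hml : m < l.length := by omega
    have hd : l.drop m = l[m] :: l.drop (m + 1) := List.drop_eq_getElem_cons hml
    have ht : l.take m ++ [l[m]] = l.take (m + 1) := by
      rw [List.take_add_one, List.getElem?_eq_getElem hml]
      rfl
    rw [Function.iterate_succ_apply, hd, stepA_cons, ht, ih (m + 1) _ (by omega)]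
    rw [List.range_succ_eq_map, List.map_cons, List.map_map]
    rw [List.append_assoc, List.singleton_append]
    congr 1
    congr 1
    apply List.map_congr_left
    intro j _
    simp only [Function.comp_apply, Nat.succ_eq_add_one]
    have e : m + 1 + j + 1 = m + (j + 1) + 1 := by omega
    rw [e]

-- characterization of B's loop
theorem genpAltLoop_spec (l : List Int) :
    ∀ (p : Int), genpAltLoop p l (sufProds l) =
      (List.range (l.length - 1)).map (fun j => [(l.drop (j + 1)).prod, (l.take (j + 1)).prod * p]) := by
  induction l with
  | nil => intro p; rfl
  | cons x xs ih =>
    intro p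
    cases xs with
    | nil => rfl
    | cons y ys =>
      show (if (y :: ys).isEmpty then [] else
        [(sufProds (y :: ys)).headD 1, x * p] :: genpAltLoop (x * p) (y :: ys) (sufProds (y :: ys))) = _
      rw [if_neg (by simp), ih (x * p), sufProds_headD]
      simp only [List.length_cons, Nat.add_sub_cancel]
      rw [List.range_succ_eq_map, List.map_cons, List.map_map]
      congr 1
      · simp
      · apply List.map_congr_left
        intro j _
        simp only [Function.comp_apply, List.drop_succ_cons, List.take_succ_cons, List.prod_cons]
        simp [mul_comm, mul_left_comm, mul_assoc]

theorem genp_eq (ac : Int) (l : List Int) :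
    genp ac l = (List.range (l.length - 1)).map
      (fun j => [(l.drop (j + 1)).prod, (l.take (j + 1)).prod]) := by
  have h1 := foldl_const_iterate (PySem.List.pyRange 0 ((l.length : Int) - 1) 1) stepA
    (([] : List (List Int)), l, ([] : List Int))
  have h2 : genp ac l = (stepA^[(PySem.List.pyRange 0 ((l.length : Int) - 1) 1).length]
      (([] : List (List Int)), l, ([] : List Int))).1 := congrArg Prod.fst h1
  rw [h2, PySem.List.length_pyRange_one]
  have hlen : ((l.length : Int) - 1 - 0).toNat = l.length - 1 := by omega
  rw [hlen]
  have := stepA_iterate l (l.length - 1) 0 [] (by omega)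
  simpa using this

-- ===== VERDICT (by name: the statement is the Claim_ definition above) =====
theorem genp_spec : Claim_equal_genp := by
  intro ac factors _
  unfold Spec_genp genp_alt
  rw [genp_eq, genpAltLoop_spec]
  apply List.map_congr_left
  intro j _
  simp
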